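-- pv_equiv track=rewrite | github.com/nits2010/DataStructureAlgo | build_company_question_list.py | is_helper_file
-- ===== SOURCE A (Python) =====
-- HELPER_FILE_NAMES = {
--     "node", "pair", "listnode", "doublylistnode", "treenode",
--     "listbuilder", "treebuilder", "commonmethods", "nestedinteger",
--     "nestedintegervalue", "customkey", "user", "split", "expensetype",
--     "percentexpense", "main", "keyvaluestore",
-- }
--
-- def is_helper_file(base_name: str) -> bool:
--     name_lower = base_name.lower()
--     if name_lower in HELPER_FILE_NAMES:
--         return True
--     # e.g. Node.java, Pair.java
--     for h in HELPER_FILE_NAMES: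
--         if name_lower == h or name_lower.startswith(h) and name_lower[len(h):].isdigit():
--             return True
--     return False
-- ===== SOURCE B (Python) =====
-- HELPER_FILE_NAMES = {
--     "node", "pair", "listnode", "doublylistnode", "treenode",
--     "listbuilder", "treebuilder", "commonmethods", "nestedinteger",
--     "nestedintegervalue", "customkey", "user", "split", "expensetype",
--     "percentexpense", "main", "keyvaluestore",
-- }
--
-- def is_helper_file(base_name: str) -> bool:
--     name = base_name.lower()
--     while name and name[-1].isdigit():
--         name = name[:-1]
--     return name in HELPER_FILE_NAMES
-- ===== Notes on version B (the rewrite author's own statement) =====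
-- stated objective: simpler
-- what changed: Instead of scanning the helper-name set and testing prefix-plus-digit-suffix against every name, B normalizes the input once (lowercase, then strip trailing digit characters) and does a single set membership test.
import Mathlib
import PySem

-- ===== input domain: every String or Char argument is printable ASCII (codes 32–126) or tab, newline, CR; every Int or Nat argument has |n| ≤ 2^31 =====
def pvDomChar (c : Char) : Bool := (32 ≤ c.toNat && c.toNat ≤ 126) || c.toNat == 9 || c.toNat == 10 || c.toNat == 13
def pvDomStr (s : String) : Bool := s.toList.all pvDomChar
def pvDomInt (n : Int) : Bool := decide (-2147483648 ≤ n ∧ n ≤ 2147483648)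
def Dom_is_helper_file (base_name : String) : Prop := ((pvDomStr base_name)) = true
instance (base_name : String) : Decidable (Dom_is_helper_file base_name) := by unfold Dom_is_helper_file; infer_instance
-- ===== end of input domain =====

-- B normalizes the name (lowercase, strip trailing digits) and does one membership test,
-- instead of A's scan over the helper-name set with a prefix+digit-suffix check per name.


-- ===== PORT A =====
-- the module constant HELPER_FILE_NAMES (a set of distinct literals; A's loop result does not
-- depend on the set's iteration order, so the literal order is used)
def pvHelperNames : List (List Char) :=
  ["node".toList, "pair".toList, "listnode".toList, "doublylistnode".toList, "treenode".toList,
   "listbuilder".toList, "treebuilder".toList, "commonmethods".toList, "nestedinteger".toList,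
   "nestedintegervalue".toList, "customkey".toList, "user".toList, "split".toList,
   "expensetype".toList, "percentexpense".toList, "main".toList, "keyvaluestore".toList]

def is_helper_file (base_name : String) : Bool :=
  let name_lower := PySem.Chars.lower base_name.toList
  if pvHelperNames.contains name_lower then true
  else
    -- for h in HELPER_FILE_NAMES: if …: return True / return False
    pvHelperNames.any (fun h =>
      name_lower == h ||
        (PySem.Chars.startswith name_lower h &&
          PySem.Chars.strIsdigit (PySem.Chars.slice name_lower (some (h.length : Int)) none)))

-- ===== PORT B =====
-- while name and name[-1].isdigit(): name = name[:-1]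
-- (on a nonempty list, name[-1] is getLastD and name[:-1] is dropLast)
def pvStripTrail (name : List Char) : List Char :=
  if !name.isEmpty && PySem.Chars.isdigit (name.getLastD ' ') then
    pvStripTrail name.dropLast
  else name
termination_by name.length
decreasing_by
  cases name with
  | nil => simp_all
  | cons a l => simp [List.length_dropLast]

def is_helper_file_alt (base_name : String) : Bool :=
  pvHelperNames.contains (pvStripTrail (PySem.Chars.lower base_name.toList))

-- ===== PRECONDITION & SPEC =====
def Spec_is_helper_file (base_name : String) (out : Bool) : Prop := out = is_helper_file_alt base_name
instance (base_name : String) (out : Bool) : Decidable (Spec_is_helper_file base_name out) := by unfold Spec_is_helper_file; infer_instance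

-- ===== CLAIM (what is proved, stated in full; the proofs are below) =====
def Claim_equal_is_helper_file : Prop := ∀ (base_name : String), Dom_is_helper_file base_name → Spec_is_helper_file base_name (is_helper_file base_name)

-- ===== LEMMAS AND PROOFS =====

-- B's while loop is: reverse, drop the leading digits, reverse back
lemma pvStripTrail_eq (s : List Char) :
    pvStripTrail s = (s.reverse.dropWhile PySem.Chars.isdigit).reverse := by
  induction s using List.reverseRecOn with
  | nil => simp [pvStripTrail]
  | append_singleton ys c ih =>
    rw [pvStripTrail]
    by_cases hc : PySem.Chars.isdigit c
    · simpa [hc] using ih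
    · simp [hc]

-- every helper name is nonempty and ends in a non-digit character
lemma pvHelperNames_nodigit_tail :
    ∀ h ∈ pvHelperNames, h ≠ [] ∧ h.reverse.dropWhile PySem.Chars.isdigit = h.reverse := by
  decide

-- A's per-name test succeeds exactly when stripping the trailing digits of s yields h
lemma per_name_iff (h s : List Char) (hne : h ≠ [])
    (hstrip : h.reverse.dropWhile PySem.Chars.isdigit = h.reverse) :
    (s = h ∨ (h <+: s ∧ PySem.Chars.strIsdigit (s.drop h.length) = true)) ↔
      (s.reverse.dropWhile PySem.Chars.isdigit).reverse = h := by
  constructor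
  · rintro (rfl | ⟨hpre, hdig⟩)
    · simp [hstrip]
    · obtain ⟨d, rfl⟩ := hpre
      have hall : ∀ c ∈ ((h ++ d).drop h.length), PySem.Chars.isdigit c := by
        intro c hc
        simp only [PySem.Chars.strIsdigit, Bool.and_eq_true, List.all_eq_true] at hdig
        exact hdig.2 c hc
      simp only [List.drop_left] at hall
      have hd : (d.reverse).dropWhile PySem.Chars.isdigit = [] := by
        rw [List.dropWhile_eq_nil_iff]
        intro c hc; exact hall c (List.mem_reverse.mp hc)
      rw [List.reverse_append, List.dropWhile_append, hd]
      simp [hstrip]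
  · intro hr
    have hsplit : s.reverse = s.reverse.takeWhile PySem.Chars.isdigit ++ h.reverse := by
      conv_lhs => rw [← List.takeWhile_append_dropWhile (p := PySem.Chars.isdigit) (l := s.reverse)]
      rw [show s.reverse.dropWhile PySem.Chars.isdigit = h.reverse by
        have := congrArg List.reverse hr; simpa using this]
    set t := s.reverse.takeWhile PySem.Chars.isdigit with ht
    have hs : s = h ++ t.reverse := by
      have := congrArg List.reverse hsplit
      simpa using this
    have htdig : ∀ c ∈ t, PySem.Chars.isdigit c := fun c hc => List.mem_takeWhile_imp hc
    rcases eq_or_ne t [] with h0 | h0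
    · left; simp [hs, h0]
    · right
      refine ⟨⟨t.reverse, hs.symm⟩, ?_⟩
      rw [hs, List.drop_left]
      simp only [PySem.Chars.strIsdigit, Bool.and_eq_true, List.all_eq_true]
      refine ⟨by simpa using h0, fun c hc => htdig c (List.mem_reverse.mp hc)⟩

-- the core equality, stated on the lowered character list
lemma core_eq (L : List Char) :
    (if pvHelperNames.contains L then true
     else pvHelperNames.any (fun h =>
        L == h ||
          (PySem.Chars.startswith L h &&
            PySem.Chars.strIsdigit (PySem.Chars.slice L (some (h.length : Int)) none)))) =
    pvHelperNames.contains (pvStripTrail L) := by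
  rw [pvStripTrail_eq, Bool.eq_iff_iff]
  have key : ∀ h ∈ pvHelperNames,
      ((L = h ∨ (h <+: L ∧ PySem.Chars.strIsdigit (L.drop h.length) = true)) ↔
        (L.reverse.dropWhile PySem.Chars.isdigit).reverse = h) := by
    intro h hmem
    obtain ⟨hne, hstrip⟩ := pvHelperNames_nodigit_tail h hmem
    exact per_name_iff h L hne hstrip
  split_ifs with hc
  · rw [List.contains_iff_exists_mem_beq] at hc
    obtain ⟨h, hmem, hbeq⟩ := hc
    have hL : L = h := by simpa using hbeq
    constructor
    · intro _
      rw [List.contains_iff_exists_mem_beq]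
      exact ⟨h, hmem, by simp [(key h hmem).mp (Or.inl hL)]⟩
    · intro _; rfl
  · simp only [List.any_eq_true, List.contains_iff_exists_mem_beq, beq_iff_eq,
      Bool.or_eq_true, Bool.and_eq_true, PySem.Chars.startswith_iff]
    constructor
    · rintro ⟨h, hmem, hcond⟩
      refine ⟨h, hmem, (key h hmem).mp ?_⟩
      rcases hcond with rfl | ⟨hpre, hdig⟩
      · exact Or.inl rfl
      · refine Or.inr ⟨hpre, ?_⟩
        rwa [PySem.Chars.slice_eq_listSlice,
          PySem.List.slice_from _ (by positivity), Int.toNat_natCast] at hdig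
    · rintro ⟨h, hmem, hr⟩
      refine ⟨h, hmem, ?_⟩
      rcases (key h hmem).mpr hr with rfl | ⟨hpre, hdig⟩
      · exact Or.inl rfl
      · refine Or.inr ⟨hpre, ?_⟩
        rwa [PySem.Chars.slice_eq_listSlice,
          PySem.List.slice_from _ (by positivity), Int.toNat_natCast]

-- ===== VERDICT (by name: the statement is the Claim_ definition above) =====
theorem is_helper_file_spec : Claim_equal_is_helper_file := by
  intro base_name _
  show is_helper_file base_name = is_helper_file_alt base_name
  unfold is_helper_file is_helper_file_alt
  exact core_eq _
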